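-- pv_equiv track=rewrite | github.com/LuisMIguelFurlanettoSousa/Beecrowd | Python/3-STRINGS/1239.py | substitui
-- ===== SOURCE A (Python) =====
-- def substitui(t):
--     conta_sublinhado = 0
--     conta_asteristico = 0
--     i = 0  # Índice manual para rastrear a posição no texto
--     while i < len(t):
--         if t[i] == "_" and conta_sublinhado == 0:
--             conta_sublinhado = 1
--             t = t[:i] + "<i>" + t[i + 1:]  # Substituir o "_"
--             i += 3  # Avançar para ignorar o "<i>"
--         elif t[i] == "_" and conta_sublinhado == 1:
--             conta_sublinhado = 0
--             t = t[:i] + "</i>" + t[i + 1:]  # Substituir o "_"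
--             i += 4  # Avançar para ignorar o "</i>"
--         elif t[i] == "*" and conta_asteristico == 0:
--             conta_asteristico = 1
--             t = t[:i] + "<b>" + t[i + 1:]  # Substituir o "*"
--             i += 3  # Avançar para ignorar o "<b>"
--         elif t[i] == "*" and conta_asteristico == 1:
--             conta_asteristico = 0
--             t = t[:i] + "</b>" + t[i + 1:]  # Substituir o "*"
--             i += 4  # Avançar para ignorar o "</b>"
--         else:
--             i += 1  # Avançar normalmente
--
--     return t
-- ===== SOURCE B (Python) =====
-- def substitui(t):
--     def pass_marker(text, marker, open_tag, close_tag):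
--         out = []
--         inside = False
--         for ch in text:
--             if ch == marker:
--                 out.append(close_tag if inside else open_tag)
--                 inside = not inside
--             else:
--                 out.append(ch)
--         return "".join(out)
--
--     t = pass_marker(t, "_", "<i>", "</i>")
--     t = pass_marker(t, "*", "<b>", "</b>")
--     return t
-- ===== Notes on version B (the rewrite author's own statement) =====
-- stated objective: faster
-- what changed: Replaces A's in-place string splicing with a manual index and two counters by two independent single-pass toggling substitutions (one for '_' -> <i>/</i>, then one for '*' -> <b>/</b>) that build the output in a list and join it.
import Mathlib
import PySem

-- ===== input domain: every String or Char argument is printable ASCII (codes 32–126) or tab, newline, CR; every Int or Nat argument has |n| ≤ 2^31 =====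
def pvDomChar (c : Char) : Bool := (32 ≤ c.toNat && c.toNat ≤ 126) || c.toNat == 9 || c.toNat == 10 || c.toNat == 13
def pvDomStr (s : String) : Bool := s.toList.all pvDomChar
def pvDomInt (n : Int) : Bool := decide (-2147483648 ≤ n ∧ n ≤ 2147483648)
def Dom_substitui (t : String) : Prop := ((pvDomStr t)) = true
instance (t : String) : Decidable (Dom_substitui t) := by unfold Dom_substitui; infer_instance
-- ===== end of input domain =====

-- B replaces A's index-and-splice loop by two independent single-pass toggling substitutions; objective: simpler.

-- ===== PORT A =====
-- A's while loop: the mutable string t, the two counters and the manual index i become the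
-- arguments of this recursion.  Since 0 ≤ i always, Python's slices t[:i] and t[i+1:] are
-- exactly List.take i / List.drop (i+1) (exact on nonnegative in-range bounds).
-- 'fuel' is only a totality guard: t.length - i drops by exactly 1 every iteration, so the
-- initial fuel t.length is never exhausted before the loop's own exit test i < len(t) fails.
def substituiGo (fuel : Nat) (t : List Char) (cs ca i : Nat) : List Char :=
  match fuel with
  | 0 => t
  | fuel + 1 =>
  if _h : i < t.length then
    if t[i] = '_' ∧ cs = 0 then
      substituiGo fuel (t.take i ++ ['<','i','>'] ++ t.drop (i+1)) 1 ca (i+3)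
    else if t[i] = '_' ∧ cs = 1 then
      substituiGo fuel (t.take i ++ ['<','/','i','>'] ++ t.drop (i+1)) 0 ca (i+4)
    else if t[i] = '*' ∧ ca = 0 then
      substituiGo fuel (t.take i ++ ['<','b','>'] ++ t.drop (i+1)) cs 1 (i+3)
    else if t[i] = '*' ∧ ca = 1 then
      substituiGo fuel (t.take i ++ ['<','/','b','>'] ++ t.drop (i+1)) cs 0 (i+4)
    else
      substituiGo fuel t cs ca (i+1)
  else t

def substitui (t : String) : String := String.mk (substituiGo t.toList.length t.toList 0 0 0)

-- ===== PORT B =====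
-- B's helper pass: fold over the characters carrying the 'inside' flag and the output list.
def passFold (marker : Char) (openT closeT : List Char) (l : List Char) : List Char :=
  (l.foldl
    (fun (st : Bool × List Char) c =>
      if c = marker then (!st.1, st.2 ++ (if st.1 then closeT else openT))
      else (st.1, st.2 ++ [c]))
    (false, [])).2

def substitui_alt (t : String) : String :=
  String.mk (passFold '*' ['<','b','>'] ['<','/','b','>']
    (passFold '_' ['<','i','>'] ['<','/','i','>'] t.toList))

-- ===== PRECONDITION & SPEC =====
def Spec_substitui (t : String) (out : String) : Prop := out = substitui_alt t
instance (t : String) (out : String) : Decidable (Spec_substitui t out) := by unfold Spec_substitui; infer_instance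

-- ===== CLAIM (what is proved, stated in full; the proofs are below) =====
def Claim_equal_substitui : Prop := ∀ (t : String), Dom_substitui t → Spec_substitui t (substitui t)

-- ===== LEMMAS AND PROOFS =====

-- one toggling pass, as a plain structural recursion (proof-side reformulation of passFold)
def passRec (marker : Char) (openT closeT : List Char) : List Char → Bool → List Char
  | [], _ => []
  | c :: rest, f =>
    if c = marker then (if f then closeT else openT) ++ passRec marker openT closeT rest (!f)
    else c :: passRec marker openT closeT rest f

-- the combined effect of A's loop on the unprocessed suffix
def bothRec : List Char → Nat → Nat → List Char
  | [], _, _ => []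
  | c :: rest, cs, ca =>
    if c = '_' ∧ cs = 0 then ['<','i','>'] ++ bothRec rest 1 ca
    else if c = '_' ∧ cs = 1 then ['<','/','i','>'] ++ bothRec rest 0 ca
    else if c = '*' ∧ ca = 0 then ['<','b','>'] ++ bothRec rest cs 1
    else if c = '*' ∧ ca = 1 then ['<','/','b','>'] ++ bothRec rest cs 0
    else c :: bothRec rest cs ca

theorem passFold_eq_passRec (marker : Char) (openT closeT : List Char)
    (l : List Char) (f : Bool) (acc : List Char) :
    (l.foldl
      (fun (st : Bool × List Char) c =>
        if c = marker then (!st.1, st.2 ++ (if st.1 then closeT else openT))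
        else (st.1, st.2 ++ [c]))
      (f, acc)).2 = acc ++ passRec marker openT closeT l f := by
  induction l generalizing f acc with
  | nil => simp [passRec]
  | cons c rest ih =>
    by_cases hc : c = marker <;> simp [passRec, hc, ih]

theorem substituiGo_eq (n : Nat) (t : List Char) (cs ca i : Nat) (hn : t.length - i ≤ n) :
    substituiGo n t cs ca i = t.take i ++ bothRec (t.drop i) cs ca := by
  induction n generalizing t cs ca i with
  | zero =>
    have h : ¬ i < t.length := by omega
    rw [substituiGo]
    simp [List.drop_eq_nil_of_le (by omega : t.length ≤ i),
      List.take_of_length_le (by omega : t.length ≤ i), bothRec]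
  | succ n ih =>
    rw [substituiGo]
    by_cases h : i < t.length
    · have hdrop : t.drop i = t[i] :: t.drop (i+1) := List.drop_eq_getElem_cons h
      have htake : (t.take i).length = i := by simp; omega
      simp only [h, dif_pos]
      by_cases h1 : t[i] = '_' ∧ cs = 0
      · rw [if_pos h1]
        rw [ih _ _ _ _ (by simp [List.length_append, List.length_take, List.length_drop]; omega)]
        rw [show t.take i ++ ['<','i','>'] ++ t.drop (i+1)
              = (t.take i ++ ['<','i','>']) ++ t.drop (i+1) by simp,
            List.take_left' (by simp [htake]),
            List.drop_left' (by simp [htake])]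
        rw [hdrop, bothRec, if_pos h1]; simp
      · rw [if_neg h1]
        by_cases h2 : t[i] = '_' ∧ cs = 1
        · rw [if_pos h2]
          rw [ih _ _ _ _ (by simp [List.length_append, List.length_take, List.length_drop]; omega)]
          rw [show t.take i ++ ['<','/','i','>'] ++ t.drop (i+1)
                = (t.take i ++ ['<','/','i','>']) ++ t.drop (i+1) by simp,
              List.take_left' (by simp [htake]),
              List.drop_left' (by simp [htake])]
          rw [hdrop, bothRec, if_neg h1, if_pos h2]; simp
        · rw [if_neg h2]
          by_cases h3 : t[i] = '*' ∧ ca = 0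
          · rw [if_pos h3]
            rw [ih _ _ _ _ (by simp [List.length_append, List.length_take, List.length_drop]; omega)]
            rw [show t.take i ++ ['<','b','>'] ++ t.drop (i+1)
                  = (t.take i ++ ['<','b','>']) ++ t.drop (i+1) by simp,
                List.take_left' (by simp [htake]),
                List.drop_left' (by simp [htake])]
            rw [hdrop, bothRec, if_neg h1, if_neg h2, if_pos h3]; simp
          · rw [if_neg h3]
            by_cases h4 : t[i] = '*' ∧ ca = 1
            · rw [if_pos h4]
              rw [ih _ _ _ _ (by simp [List.length_append, List.length_take, List.length_drop]; omega)]
              rw [show t.take i ++ ['<','/','b','>'] ++ t.drop (i+1)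
                    = (t.take i ++ ['<','/','b','>']) ++ t.drop (i+1) by simp,
                  List.take_left' (by simp [htake]),
                  List.drop_left' (by simp [htake])]
              rw [hdrop, bothRec, if_neg h1, if_neg h2, if_neg h3, if_pos h4]; simp
            · rw [if_neg h4]
              rw [ih _ _ _ _ (by omega)]
              rw [hdrop, bothRec, if_neg h1, if_neg h2, if_neg h3, if_neg h4]
              have ht : List.take (i+1) t = List.take i t ++ [t[i]] := by
                rw [List.take_succ]; simp [List.getElem?_eq_getElem h]
              rw [ht, List.append_assoc]; rfl
    · simp [h, List.drop_eq_nil_of_le (by omega : t.length ≤ i),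
        List.take_of_length_le (by omega : t.length ≤ i), bothRec]

-- the star pass leaves the inserted italic tags untouched (they contain no '*')
theorem passRec_star_tag (tag : List Char) (htag : ∀ c ∈ tag, c ≠ '*')
    (xs : List Char) (f : Bool) :
    passRec '*' ['<','b','>'] ['<','/','b','>'] (tag ++ xs) f
      = tag ++ passRec '*' ['<','b','>'] ['<','/','b','>'] xs f := by
  induction tag with
  | nil => simp
  | cons c rest ih =>
    simp only [List.cons_append, passRec, if_neg (htag c (by simp))]
    rw [ih (fun c hc => htag c (by simp [hc]))]

set_option maxRecDepth 4000 in
theorem two_passes_eq_both (l : List Char) (f1 f2 : Bool) :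
    passRec '*' ['<','b','>'] ['<','/','b','>']
      (passRec '_' ['<','i','>'] ['<','/','i','>'] l f1) f2
      = bothRec l (if f1 then 1 else 0) (if f2 then 1 else 0) := by
  induction l generalizing f1 f2 with
  | nil => simp [passRec, bothRec]
  | cons c rest ih =>
    by_cases hc : c = '_'
    · subst hc
      rw [passRec, if_pos rfl]
      cases f1
      · rw [if_neg (by decide),
          passRec_star_tag ['<','i','>'] (by simp) _ f2, ih]
        simp [bothRec]
      · rw [if_pos rfl,
          passRec_star_tag ['<','/','i','>'] (by simp) _ f2, ih]
        simp [bothRec]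
    · rw [passRec, if_neg hc, passRec]
      by_cases hs : c = '*'
      · subst hs
        rw [if_pos rfl, ih]
        cases f2 <;> cases f1 <;> simp [bothRec]
      · rw [if_neg hs, ih]
        cases f1 <;> cases f2 <;> simp [bothRec, hc, hs]

-- ===== VERDICT (by name: the statement is the Claim_ definition above) =====
theorem substitui_spec : Claim_equal_substitui := by
  intro t _
  unfold Spec_substitui substitui substitui_alt passFold
  rw [passFold_eq_passRec, passFold_eq_passRec]
  simp only [List.nil_append]
  rw [two_passes_eq_both]
  rw [substituiGo_eq (t.toList.length) _ 0 0 0 (by omega)]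
  simp
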